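-- pv_equiv track=rewrite | github.com/monpro/algorithm | src/dps/house-robber-ii-213.py | robByRange
-- ===== SOURCE A (Python) =====
-- def robByRange(nums, start, end):
--     if not nums or start > len(nums):
--       return 0
--     prev, cur = 0, 0
--     for i in range(start, end + 1):
--       temp = cur
--       cur = max(cur, prev + nums[i])
--       prev = temp
--     return max(cur, prev)
-- ===== SOURCE B (Python) =====
-- def robByRange(nums, start, end):
--     # B: divide and conquer over the index interval; each half yields a 2x2 table
--     # t[f][l] = best non-adjacent sum when the first/last element may be taken
--     # only if f/l is 1; halves are merged by a max-plus combine on the boundary.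
--     if not nums or start > len(nums):
--         return 0
--
--     def solve(lo, hi):
--         if lo > hi:
--             return (0, 0, 0, 0)
--         if lo == hi:
--             return (0, 0, 0, max(0, nums[lo]))
--         mid = (lo + hi) // 2
--         a00, a01, a10, a11 = solve(lo, mid)
--         b00, b01, b10, b11 = solve(mid + 1, hi)
--         return (max(a01 + b00, a00 + b10), max(a01 + b01, a00 + b11),
--                 max(a11 + b00, a10 + b10), max(a11 + b01, a10 + b11))
--
--     return solve(start, end)[3]
-- ===== Notes on version B (the rewrite author's own statement) =====
-- stated objective: alternative
-- what changed: B replaces A's single forward rolling-pair loop with a divide-and-conquer recursion: each index interval is solved into a 2x2 table t[f][l] (best non-adjacent sum with the first/last element takeable only if allowed) and halves are merged by a max-plus boundary combine; the answer is the unconstrained entry t[1][1].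
import Mathlib
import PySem

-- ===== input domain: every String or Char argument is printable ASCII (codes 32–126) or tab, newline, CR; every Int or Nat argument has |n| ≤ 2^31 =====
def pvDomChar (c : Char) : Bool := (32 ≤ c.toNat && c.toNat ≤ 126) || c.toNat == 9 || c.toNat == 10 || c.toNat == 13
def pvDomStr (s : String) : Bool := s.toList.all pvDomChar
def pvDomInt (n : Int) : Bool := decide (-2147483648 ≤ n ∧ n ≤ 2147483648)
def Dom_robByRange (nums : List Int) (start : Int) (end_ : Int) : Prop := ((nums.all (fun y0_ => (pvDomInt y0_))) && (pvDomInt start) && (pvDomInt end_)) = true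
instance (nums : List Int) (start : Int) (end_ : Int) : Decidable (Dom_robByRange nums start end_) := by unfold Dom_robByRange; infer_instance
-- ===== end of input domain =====

-- B replaces A's forward rolling-pair loop by a divide-and-conquer recursion over the index
-- interval: each half yields a 2x2 table t[f][l] (best non-adjacent sum where the first/last
-- element may be taken only if f/l allows) merged by a max-plus boundary combine; same cost.

-- ===== PORT A =====
def robByRange (nums : List Int) (start : Int) (end_ : Int) : Int :=
  if nums = [] ∨ (nums.length : Int) < start then 0
  else
    let pc := (PySem.List.pyRange start (end_ + 1) 1).foldl
      (fun (pc : Int × Int) i =>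
        (pc.2, max pc.2 (pc.1 + PySem.List.pyGetD nums i 0))) (0, 0)
    max pc.2 pc.1

-- ===== PORT B =====
-- the max-plus combine of B's two half tables (a00,a01,a10,a11), (b00,b01,b10,b11)
def pvCombine (L R : Int × Int × Int × Int) : Int × Int × Int × Int :=
  (max (L.2.1 + R.1) (L.1 + R.2.2.1), max (L.2.1 + R.2.1) (L.1 + R.2.2.2),
   max (L.2.2.2 + R.1) (L.2.2.1 + R.2.2.1), max (L.2.2.2 + R.2.1) (L.2.2.1 + R.2.2.2))

def pvSolve (nums : List Int) (lo hi : Int) : Int × Int × Int × Int :=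
  if hi < lo then (0, 0, 0, 0)
  else if lo = hi then (0, 0, 0, max 0 (PySem.List.pyGetD nums lo 0))
  else
    let mid := PySem.Int.floordiv (lo + hi) 2
    pvCombine (pvSolve nums lo mid) (pvSolve nums (mid + 1) hi)
termination_by (hi - lo).toNat
decreasing_by
  all_goals
    have hmid := PySem.Int.floordiv_two_mid_bounds (lo := lo) (hi := hi) (by omega)
    have hlt : PySem.Int.floordiv (lo + hi) 2 < hi := by
      rw [PySem.Int.floordiv_eq_ediv_of_pos (by omega)]; omega
    omega

def robByRange_alt (nums : List Int) (start : Int) (end_ : Int) : Int :=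
  if nums = [] ∨ (nums.length : Int) < start then 0
  else (pvSolve nums start end_).2.2.2

-- ===== PRECONDITION & SPEC =====
-- Pre_ excludes exactly the inputs on which A raises IndexError: the loop runs (guard false,
-- start ≤ end) and some index in [start, end] is outside Python's valid index range for nums.
def Pre_robByRange (nums : List Int) (start : Int) (end_ : Int) : Prop :=
  nums = [] ∨ (nums.length : Int) < start ∨ end_ < start ∨
    (-(nums.length : Int) ≤ start ∧ end_ < (nums.length : Int))
instance (nums : List Int) (start : Int) (end_ : Int) : Decidable (Pre_robByRange nums start end_) := by unfold Pre_robByRange; infer_instance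

def pvWitness_robByRange : List Int × Int × Int := ([3, 2, 5, 1], 0, 3)

def Spec_robByRange (nums : List Int) (start : Int) (end_ : Int) (out : Int) : Prop := out = robByRange_alt nums start end_
instance (nums : List Int) (start : Int) (end_ : Int) (out : Int) : Decidable (Spec_robByRange nums start end_ out) := by unfold Spec_robByRange; infer_instance

-- ===== CLAIM (what is proved, stated in full; the proofs are below) =====
def Claim_equal_robByRange : Prop := ∀ (nums : List Int) (start : Int) (end_ : Int), Dom_robByRange nums start end_ → Pre_robByRange nums start end_ → Spec_robByRange nums start end_ (robByRange nums start end_)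

-- ===== LEMMAS AND PROOFS =====

-- one-element table and right extension of a table (the sequential reading of B's tables)
def pvSingle (v : Int) : Int × Int × Int × Int := (0, 0, 0, max 0 v)

def pvE (t : Int × Int × Int × Int) (v : Int) : Int × Int × Int × Int :=
  (t.2.1, max t.2.1 (t.1 + v), t.2.2.2, max t.2.2.2 (t.2.2.1 + v))

-- pvT e lo k = table of the interval [lo, lo + k] built sequentially
def pvT (e : Int → Int) (lo : Int) : ℕ → Int × Int × Int × Int
  | 0 => pvSingle (e lo)
  | (k + 1) => pvE (pvT e lo k) (e (lo + (k : ℤ) + 1))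

lemma pvT_mono (e : Int → Int) (lo : Int) (k : ℕ) :
    (pvT e lo k).1 ≤ (pvT e lo k).2.1 ∧ (pvT e lo k).2.2.1 ≤ (pvT e lo k).2.2.2 := by
  induction k with
  | zero => simp [pvT, pvSingle]
  | succ k ih => simp only [pvT, pvE]; omega

lemma pvCombine_single (t : Int × Int × Int × Int)
    (h1 : t.1 ≤ t.2.1) (h2 : t.2.2.1 ≤ t.2.2.2) (v : Int) :
    pvCombine t (pvSingle v) = pvE t v := by
  simp [pvCombine, pvSingle, pvE, Prod.ext_iff]
  omega

lemma pvCombine_E (X Y : Int × Int × Int × Int) (v : Int) :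
    pvCombine X (pvE Y v) = pvE (pvCombine X Y) v := by
  obtain ⟨a00, a01, a10, a11⟩ := X
  obtain ⟨b00, b01, b10, b11⟩ := Y
  simp [pvCombine, pvE, Prod.ext_iff]
  omega

lemma pvCombine_T (e : Int → Int) (lo : Int) (j k : ℕ) :
    pvCombine (pvT e lo j) (pvT e (lo + (j : ℤ) + 1) k) = pvT e lo (j + k + 1) := by
  induction k with
  | zero =>
    have hm := pvT_mono e lo j
    simpa [pvT] using pvCombine_single (pvT e lo j) hm.1 hm.2 (e (lo + (j : ℤ) + 1))
  | succ k ih =>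
    have h1 : pvT e (lo + (j : ℤ) + 1) (k + 1)
        = pvE (pvT e (lo + (j : ℤ) + 1) k) (e (lo + (j : ℤ) + 1 + (k : ℤ) + 1)) := rfl
    have hidx : lo + (j : ℤ) + 1 + (k : ℤ) + 1 = lo + ((j + k + 1 : ℕ) : ℤ) + 1 := by
      push_cast; ring
    rw [show j + (k + 1) + 1 = (j + k + 1) + 1 from by omega, h1, hidx, pvCombine_E, ih]
    rfl

lemma pvSolve_eq_T (nums : List Int) (lo hi : Int) (h : lo ≤ hi) :
    pvSolve nums lo hi = pvT (fun i => PySem.List.pyGetD nums i 0) lo (hi - lo).toNat := by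
  generalize hn : (hi - lo).toNat = n
  induction n using Nat.strong_induction_on generalizing lo hi with
  | _ n ih =>
    rcases eq_or_lt_of_le h with heq | hlt
    · subst heq
      rw [pvSolve, if_neg (lt_irrefl lo), if_pos rfl]
      have : n = 0 := by omega
      subst this; simp [pvT, pvSingle]
    · have hmid := PySem.Int.floordiv_two_mid_bounds (lo := lo) (hi := hi) (by omega)
      have hmlt : PySem.Int.floordiv (lo + hi) 2 < hi := by
        rw [PySem.Int.floordiv_eq_ediv_of_pos (by omega)]; omega
      have hstep : pvSolve nums lo hi
          = pvCombine (pvSolve nums lo (PySem.Int.floordiv (lo + hi) 2))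
              (pvSolve nums (PySem.Int.floordiv (lo + hi) 2 + 1) hi) := by
        rw [pvSolve, if_neg (by omega), if_neg (by omega)]
      have h1 := ih (PySem.Int.floordiv (lo + hi) 2 - lo).toNat (by omega) lo
        (PySem.Int.floordiv (lo + hi) 2) (by omega) rfl
      have h2 := ih (hi - (PySem.Int.floordiv (lo + hi) 2 + 1)).toNat (by omega)
        (PySem.Int.floordiv (lo + hi) 2 + 1) hi (by omega) rfl
      rw [hstep, h1, h2]
      have hcast : PySem.Int.floordiv (lo + hi) 2 + 1
          = lo + (((PySem.Int.floordiv (lo + hi) 2 - lo).toNat : ℕ) : ℤ) + 1 := by omega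
      rw [hcast, pvCombine_T]
      congr 1
      omega

-- A's loop state after the elements lo..lo+k is the (a10, a11) pair of B's table
lemma pv_fold_T (nums : List Int) (lo : Int) (k : ℕ) :
    (PySem.List.pyRange lo (lo + (k : ℤ) + 1) 1).foldl
      (fun (pc : Int × Int) i =>
        (pc.2, max pc.2 (pc.1 + PySem.List.pyGetD nums i 0))) (0, 0)
    = ((pvT (fun i => PySem.List.pyGetD nums i 0) lo k).2.2.1,
       (pvT (fun i => PySem.List.pyGetD nums i 0) lo k).2.2.2) := by
  induction k with
  | zero =>
    rw [show lo + ((0 : ℕ) : ℤ) + 1 = lo + 1 from by simp,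
        PySem.List.pyRange_one_cons (by omega), PySem.List.pyRange_one_eq_nil (by omega)]
    simp [pvT, pvSingle]
  | succ k ih =>
    have hsplit : PySem.List.pyRange lo (lo + ((k + 1 : ℕ) : ℤ) + 1) 1
        = PySem.List.pyRange lo (lo + (k : ℤ) + 1) 1 ++ [lo + (k : ℤ) + 1] := by
      rw [show lo + ((k + 1 : ℕ) : ℤ) + 1 = (lo + (k : ℤ) + 1) + 1 from by push_cast; ring]
      exact PySem.List.pyRange_one_succ_right (by omega)
    rw [hsplit, List.foldl_append, ih]
    simp [pvT, pvE]

theorem robByRange_spec : Claim_equal_robByRange := by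
  unfold Claim_equal_robByRange Spec_robByRange
  intro nums start end_ _ _
  unfold robByRange robByRange_alt
  by_cases hg : nums = [] ∨ (nums.length : Int) < start
  · rw [if_pos hg, if_pos hg]
  · rw [if_neg hg, if_neg hg]
    by_cases hle : start ≤ end_
    · set k : ℕ := (end_ - start).toNat with hk
      have hend : end_ + 1 = start + (k : ℤ) + 1 := by omega
      rw [hend, pv_fold_T nums start k, pvSolve_eq_T nums start end_ hle,
          show (end_ - start).toNat = k from rfl]
      dsimp only
      have hm := pvT_mono (fun i => PySem.List.pyGetD nums i 0) start k
      omega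
    · rw [PySem.List.pyRange_one_eq_nil (by omega), pvSolve, if_pos (by omega)]
      simp
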